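-- pv_equiv track=rewrite | github.com/christopher-burke/warmups | python/misc/words_with_duplicate_letters.py | no_duplicate_letters
-- ===== SOURCE A (Python) =====
-- def no_duplicate_letters(phrase: str) -> bool:
--     """Check if each word has distinct letters in phrase."""
--     words = phrase.split(' ')
--     for word in words:
--         if len(set(word)) == len(word):
--             continue
--         else:
--             return False
--     return True
-- ===== SOURCE B (Python) =====
-- def no_duplicate_letters(phrase: str) -> bool:
--     """Check if each word has distinct letters in phrase."""
--     for word in phrase.split(' '):
--         s = sorted(word)
--         for a, b in zip(s, s[1:]):
--             if a == b:
--                 return False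
--     return True
-- ===== Notes on version B (the rewrite author's own statement) =====
-- stated objective: alternative
-- what changed: Per-word distinctness is decided by sorting the word and scanning adjacent pairs for an equal neighbour, instead of A's len(set(word)) == len(word) size comparison.
import Mathlib
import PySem

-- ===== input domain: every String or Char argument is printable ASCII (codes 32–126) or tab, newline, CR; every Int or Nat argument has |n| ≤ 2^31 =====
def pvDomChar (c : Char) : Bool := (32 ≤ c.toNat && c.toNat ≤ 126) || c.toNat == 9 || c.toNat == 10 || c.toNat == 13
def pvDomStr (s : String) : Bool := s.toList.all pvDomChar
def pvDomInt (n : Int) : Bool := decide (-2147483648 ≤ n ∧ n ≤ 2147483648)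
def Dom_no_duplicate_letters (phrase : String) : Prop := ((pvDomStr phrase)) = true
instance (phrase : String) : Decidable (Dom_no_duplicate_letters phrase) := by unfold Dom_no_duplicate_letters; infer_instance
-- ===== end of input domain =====

-- B checks per-word letter distinctness by sort + adjacent comparison instead of A's
-- set-size comparison; objective: alternative strategy, same observable behaviour (total).

-- ===== PORT A =====
-- the 'for word in words' loop: continue while len(set(word)) == len(word), else return False
def pvALoop : List String → Bool
  | [] => true
  | w :: ws =>
      if (PySem.Set.ofList w.toList).length == w.toList.length then pvALoop ws
      else false

def no_duplicate_letters (phrase : String) : Bool :=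
  -- phrase.split(' '); the separator " " is nonempty so split? is always some
  pvALoop ((PySem.Str.split? phrase " ").getD [])

-- ===== PORT B =====
-- the inner 'for a, b in zip(s, s[1:])' loop: return True at the first equal adjacent pair
def pvBAdj : List (Char × Char) → Bool
  | [] => false
  | (a, b) :: t => if a == b then true else pvBAdj t

-- the outer loop over phrase.split(' '); s[1:] on a list is List.drop 1 (exact for index 1 ≥ 0)
def pvBLoop : List String → Bool
  | [] => true
  | w :: ws =>
      let s := PySem.List.sorted w.toList (fun c => c) false
      if pvBAdj (List.zip s (List.drop 1 s)) then false else pvBLoop ws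

def no_duplicate_letters_alt (phrase : String) : Bool :=
  pvBLoop ((PySem.Str.split? phrase " ").getD [])

-- ===== PRECONDITION & SPEC =====
def Spec_no_duplicate_letters (phrase : String) (out : Bool) : Prop := out = no_duplicate_letters_alt phrase
instance (phrase : String) (out : Bool) : Decidable (Spec_no_duplicate_letters phrase out) := by unfold Spec_no_duplicate_letters; infer_instance

-- ===== CLAIM (what is proved, stated in full; the proofs are below) =====
def Claim_equal_no_duplicate_letters : Prop := ∀ (phrase : String), Dom_no_duplicate_letters phrase → Spec_no_duplicate_letters phrase (no_duplicate_letters phrase)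

-- ===== LEMMAS AND PROOFS =====

-- A's per-word test: the set of a word has the word's size iff the letters are distinct
theorem ofList_length_eq_iff_nodup (w : List Char) :
    (PySem.Set.ofList w).length = w.length ↔ w.Nodup := by
  constructor
  · intro h
    induction w with
    | nil => exact List.nodup_nil
    | cons x xs ih =>
      rw [PySem.Set.ofList_cons] at h
      by_cases hx : x ∈ xs
      · exfalso
        have hxs : x ∈ PySem.Set.ofList xs := (PySem.Set.mem_ofList xs x).mpr hx
        have hlt : ((PySem.Set.ofList xs).discard x).length < (PySem.Set.ofList xs).length := by
          unfold PySem.Set.discard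
          refine List.length_filter_lt_length_iff_exists.mpr ⟨x, hxs, ?_⟩
          simp only [beq_self_eq_true, Bool.not_true, Bool.false_eq_true, not_false_eq_true]
        have hle := PySem.Set.length_ofList_le xs
        simp only [List.length_cons] at h
        omega
      · have hdis : (PySem.Set.ofList xs).discard x = PySem.Set.ofList xs := by
          unfold PySem.Set.discard
          refine List.filter_eq_self.mpr ?_
          intro a ha
          have : a ∈ xs := (PySem.Set.mem_ofList xs a).mp ha
          simp only [Bool.not_eq_true', beq_eq_false_iff_ne, ne_eq]
          rintro rfl; exact hx this
        rw [hdis] at h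
        simp only [List.length_cons] at h
        exact List.nodup_cons.mpr ⟨hx, ih (by omega)⟩
  · intro h
    rw [PySem.Set.ofList_eq_self_of_nodup w h]

-- B's inner loop returns false iff no two adjacent elements are equal
theorem pvBAdj_false_iff_chain (s : List Char) :
    pvBAdj (List.zip s (List.drop 1 s)) = false ↔ s.IsChain (· ≠ ·) := by
  induction s with
  | nil =>
    constructor
    · intro _; exact List.IsChain.nil
    · intro _; rfl
  | cons a t ih =>
    cases t with
    | nil =>
      constructor
      · intro _; exact List.isChain_singleton _
      · intro _; rfl
    | cons b t' =>
      simp only [List.drop_succ_cons, List.drop_zero, List.zip_cons_cons, pvBAdj]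
      rw [List.isChain_cons_cons]
      by_cases hab : a = b
      · simp [hab]
      · have hb : (a == b) = false := by simp [hab]
        rw [hb]
        simp only [Bool.false_eq_true, if_false]
        have ih' := ih
        simp only [List.drop_succ_cons, List.drop_zero] at ih'
        rw [ih']
        simp [hab]

-- adjacent ≤ together with adjacent ≠ is adjacent <
theorem chain_lt_of_le_ne (s : List Char) (h1 : s.IsChain (· ≤ ·)) (h2 : s.IsChain (· ≠ ·)) :
    s.IsChain (· < ·) := by
  induction s with
  | nil => exact List.IsChain.nil
  | cons a t ih =>
    cases t with
    | nil => exact List.isChain_singleton _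
    | cons b t' =>
      rw [List.isChain_cons_cons] at h1 h2 ⊢
      exact ⟨lt_of_le_of_ne h1.1 h2.1, ih h1.2 h2.2⟩

-- the sorted word has no equal adjacent pair iff the word's letters are distinct
theorem pvBAdj_sorted_iff_nodup (w : List Char) :
    pvBAdj (List.zip (PySem.List.sorted w (fun c => c) false)
      (List.drop 1 (PySem.List.sorted w (fun c => c) false))) = false ↔ w.Nodup := by
  rw [pvBAdj_false_iff_chain]
  have hperm : (PySem.List.sorted w (fun c => c) false).Perm w := PySem.List.sorted_perm w _ _
  have hpw : (PySem.List.sorted w (fun c => c) false).Pairwise (· ≤ ·) :=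
    PySem.List.sorted_pairwise w (fun c => c)
  constructor
  · intro h
    refine hperm.nodup_iff.mp ?_
    have hlt := chain_lt_of_le_ne _ hpw.isChain h
    exact (List.IsChain.pairwise hlt).imp ne_of_lt
  · intro h
    exact (hperm.nodup_iff.mpr h).isChain

-- the two word loops agree
theorem loops_eq (ws : List String) : pvALoop ws = pvBLoop ws := by
  induction ws with
  | nil => rfl
  | cons w t ih =>
    simp only [pvALoop, pvBLoop]
    by_cases h : w.toList.Nodup
    · have ha : ((PySem.Set.ofList w.toList).length == w.toList.length) = true := by
        exact beq_iff_eq.mpr ((ofList_length_eq_iff_nodup w.toList).mpr h)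
      have hb := (pvBAdj_sorted_iff_nodup w.toList).mpr h
      rw [ha, if_pos rfl, hb, if_neg (by simp), ih]
    · have ha : ((PySem.Set.ofList w.toList).length == w.toList.length) = false := by
        refine beq_eq_false_iff_ne.mpr ?_
        intro hc; exact h ((ofList_length_eq_iff_nodup w.toList).mp hc)
      have hb : pvBAdj (List.zip (PySem.List.sorted w.toList (fun c => c) false)
          (List.drop 1 (PySem.List.sorted w.toList (fun c => c) false))) = true := by
        rcases Bool.eq_false_or_eq_true (pvBAdj (List.zip (PySem.List.sorted w.toList (fun c => c) false)
          (List.drop 1 (PySem.List.sorted w.toList (fun c => c) false)))) with ht | hf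
        · exact ht
        · exact absurd ((pvBAdj_sorted_iff_nodup w.toList).mp hf) h
      rw [ha, hb]
      simp

-- ===== VERDICT (by name: the statement is the Claim_ definition above) =====
theorem no_duplicate_letters_spec : Claim_equal_no_duplicate_letters := by
  intro phrase _
  show no_duplicate_letters phrase = no_duplicate_letters_alt phrase
  unfold no_duplicate_letters no_duplicate_letters_alt
  exact loops_eq _
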